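-- pv_equiv track=rewrite | github.com/coleleavitt/blackscraper | obagy/obagy.com/cs120/LABS/lab8_solutions.py | first_matches_last
-- ===== SOURCE A (Python) =====
-- def first_matches_last(slist):
--     if slist == []:
--         return []
--     else:
--         s = slist[0]
--         if s[0] == s[-1]:
--             return [slist[0]] + first_matches_last(slist[1:])
--         else:
--             return first_matches_last(slist[1:])
-- ===== SOURCE B (Python) =====
-- def first_matches_last(slist):
--     result = []
--     for s in slist:
--         if s[0] == s[-1]:
--             result.append(s)
--     return result
-- ===== Notes on version B (the rewrite author's own statement) =====
-- stated objective: faster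
-- what changed: Replaced A's recursion that rebuilds the result with a fresh list concatenation at every matching element by a single iterative pass appending to one accumulator.
import Mathlib
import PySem

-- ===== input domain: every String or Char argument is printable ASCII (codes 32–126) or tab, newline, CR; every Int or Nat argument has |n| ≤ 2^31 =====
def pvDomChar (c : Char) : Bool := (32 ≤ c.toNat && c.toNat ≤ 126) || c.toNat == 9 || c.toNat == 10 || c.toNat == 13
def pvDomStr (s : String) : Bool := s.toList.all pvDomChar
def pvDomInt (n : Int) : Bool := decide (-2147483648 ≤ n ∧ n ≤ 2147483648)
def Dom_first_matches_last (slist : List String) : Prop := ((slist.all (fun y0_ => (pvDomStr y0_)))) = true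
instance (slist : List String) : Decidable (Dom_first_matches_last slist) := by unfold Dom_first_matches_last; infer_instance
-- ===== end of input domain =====

-- ===== PORT A =====
-- B replaces A's recursion-with-concatenation by one iterative accumulator pass (return value only).
-- Port of A: structural recursion; the `| _, _ => []` arm is where Python raises IndexError (excluded by Pre_).
def first_matches_last (slist : List String) : List String :=
  match slist with
  | [] => []
  | s :: rest =>
    match PySem.Str.pyGet? s 0, PySem.Str.pyGet? s (-1) with
    | some a, some b =>
      if a == b then s :: first_matches_last rest else first_matches_last rest
    | _, _ => []

-- ===== PORT B =====
-- Port of B: a fold over the list carrying the `result` accumulator (the `none => acc` arms are the IndexError case, excluded by Pre_).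
def fmlStep (acc : List String) (s : String) : List String :=
  match PySem.Str.pyGet? s 0 with
  | none => acc
  | some a =>
    match PySem.Str.pyGet? s (-1) with
    | none => acc
    | some b => if a == b then acc ++ [s] else acc

def first_matches_last_alt (slist : List String) : List String :=
  slist.foldl fmlStep []

-- ===== PRECONDITION & SPEC =====
-- Pre_ excludes lists containing an empty string, on which both A and B raise IndexError (s[0]).
def Pre_first_matches_last (slist : List String) : Prop := ∀ s ∈ slist, s ≠ ""
instance (slist : List String) : Decidable (Pre_first_matches_last slist) := by
  unfold Pre_first_matches_last; infer_instance
def pvWitness_first_matches_last : List String := ["aa", "ab", "x"]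
def Spec_first_matches_last (slist : List String) (out : List String) : Prop := out = first_matches_last_alt slist
instance (slist : List String) (out : List String) : Decidable (Spec_first_matches_last slist out) := by unfold Spec_first_matches_last; infer_instance

-- ===== CLAIM (what is proved, stated in full; the proofs are below) =====
def Claim_equal_first_matches_last : Prop := ∀ (slist : List String), Dom_first_matches_last slist → Pre_first_matches_last slist → Spec_first_matches_last slist (first_matches_last slist)

-- ===== LEMMAS AND PROOFS =====

-- Loop invariant for B's fold: with all elements nonempty, folding from `acc` yields `acc ++` A's result.
theorem fml_foldl_inv (l : List String) (acc : List String)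
    (h : ∀ s ∈ l, s ≠ "") :
    l.foldl fmlStep acc = acc ++ first_matches_last l := by
  induction l generalizing acc with
  | nil => simp [first_matches_last]
  | cons s rest ih =>
    have hs : s ≠ "" := h s (by simp)
    have hrest : ∀ t ∈ rest, t ≠ "" := fun t ht => h t (by simp [ht])
    have hlen : 0 < s.toList.length := List.length_pos_iff.mpr (by simpa using hs)
    have h0 : ∃ a, PySem.Str.pyGet? s 0 = some a := by
      cases hg : PySem.Str.pyGet? s 0 with
      | some a => exact ⟨a, rfl⟩
      | none =>
        exfalso
        simp [PySem.Str.pyGet?] at hg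
        rw [PySem.List.pyGet?_eq_none_iff] at hg
        exact hg (by unfold PySem.Raise.InRange; omega)
    have h1 : ∃ b, PySem.Str.pyGet? s (-1) = some b := by
      cases hg : PySem.Str.pyGet? s (-1) with
      | some b => exact ⟨b, rfl⟩
      | none =>
        exfalso
        simp [PySem.Str.pyGet?] at hg
        rw [PySem.List.pyGet?_eq_none_iff] at hg
        exact hg (by unfold PySem.Raise.InRange; omega)
    obtain ⟨a, ha⟩ := h0
    obtain ⟨b, hb⟩ := h1
    simp only [PySem.Str.pyGet?, PySem.Chars.pyGet?] at ha hb
    by_cases hab : a = b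
    · simp [List.foldl, fmlStep, PySem.Str.pyGet?, first_matches_last, ha, hb, hab, ih _ hrest]
    · simp [List.foldl, fmlStep, PySem.Str.pyGet?, first_matches_last, ha, hb, hab, ih _ hrest]

-- ===== VERDICT (by name: the statement is the Claim_ definition above) =====
theorem first_matches_last_spec : Claim_equal_first_matches_last := by
  intro slist _ hpre
  unfold Spec_first_matches_last first_matches_last_alt
  rw [fml_foldl_inv slist [] hpre]
  simp
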